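-- pv_equiv track=rewrite | github.com/ali1hammoud/GeneticAlgorithm-GraphColoringProblem | GA.py | fitness_calculation_1
-- ===== SOURCE A (Python) =====
-- def fitness_calculation_1(individual, adjacency_matrix):
--     fitness_fault = 0
--     for i in range(len(individual)-1):
--         for j in range(len(individual)):
--             if individual[i] == individual[j] and adjacency_matrix[j][i] == 1:
--                 fitness_fault += 1
--     fitness_value =  fitness_fault
--     return fitness_value
-- ===== SOURCE B (Python) =====
-- def fitness_calculation_1(individual, adjacency_matrix):
--     groups = {}
--     for j, color in enumerate(individual):
--         groups.setdefault(color, []).append(j)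
--     total = 0
--     for i, color in enumerate(individual[:-1]):
--         for j in groups[color]:
--             if adjacency_matrix[j][i] == 1:
--                 total += 1
--     return total
-- ===== Notes on version B (the rewrite author's own statement) =====
-- stated objective: alternative
-- what changed: B first buckets vertex indices by color into a dict (one pass), then for each source vertex scans only its own color group instead of A's full n x n double scan with a color test on every pair.
import Mathlib
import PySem

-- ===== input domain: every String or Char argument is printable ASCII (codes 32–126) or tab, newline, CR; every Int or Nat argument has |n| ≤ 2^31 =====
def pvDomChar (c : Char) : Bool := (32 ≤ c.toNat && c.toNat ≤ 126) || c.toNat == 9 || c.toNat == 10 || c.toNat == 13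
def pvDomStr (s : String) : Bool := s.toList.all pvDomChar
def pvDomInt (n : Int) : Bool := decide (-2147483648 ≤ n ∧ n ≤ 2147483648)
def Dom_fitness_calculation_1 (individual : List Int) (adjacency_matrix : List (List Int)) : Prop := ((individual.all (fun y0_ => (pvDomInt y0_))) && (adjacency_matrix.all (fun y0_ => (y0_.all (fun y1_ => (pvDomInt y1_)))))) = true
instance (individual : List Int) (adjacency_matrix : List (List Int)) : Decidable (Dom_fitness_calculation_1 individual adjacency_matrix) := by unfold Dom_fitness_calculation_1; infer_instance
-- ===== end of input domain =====

-- B buckets vertex indices by color into a dict and lets each source vertex scan only its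
-- own color group, an alternative decomposition of A's full n×n scan; equal value proved on Pre_.

-- ===== PORT A =====
def fitness_calculation_1 (individual : List Int) (adjacency_matrix : List (List Int)) : Int :=
  (PySem.List.pyRange 0 ((individual.length : Int) - 1) 1).foldl (fun acc i =>
    (PySem.List.pyRange 0 (individual.length : Int) 1).foldl (fun acc j =>
      if (PySem.List.pyGetD individual i 0 == PySem.List.pyGetD individual j 0)
          && (PySem.List.pyGetD (PySem.List.pyGetD adjacency_matrix j []) i 0 == 1)
      then acc + 1 else acc) acc) 0

-- ===== PORT B =====
def fitness_calculation_1_alt (individual : List Int) (adjacency_matrix : List (List Int)) : Int :=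
  let groups : PySem.Dict Int (List Int) :=
    (PySem.List.enumerate individual).foldl
      (fun d p => d.modify p.2 [] (fun g => g ++ [p.1])) PySem.Dict.empty
  (PySem.List.enumerate (PySem.List.slice individual none (some (-1)))).foldl
    (fun acc p =>
      (groups.getD p.2 []).foldl
        (fun acc j =>
          if PySem.List.pyGetD (PySem.List.pyGetD adjacency_matrix j []) p.1 0 == 1
          then acc + 1 else acc) acc) 0

-- ===== PRECONDITION & SPEC =====
-- Pre_ excludes exactly the inputs where Python A raises an IndexError: some same-color pair
-- (i, j) with source i < len-1 whose matrix cell adjacency_matrix[j][i] does not exist.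
def Pre_fitness_calculation_1 (individual : List Int) (adjacency_matrix : List (List Int)) : Prop :=
  ∀ i < individual.length - 1, ∀ j < individual.length,
    individual.getD i 0 = individual.getD j 0 →
    j < adjacency_matrix.length ∧ i < (adjacency_matrix.getD j []).length
instance (individual : List Int) (adjacency_matrix : List (List Int)) : Decidable (Pre_fitness_calculation_1 individual adjacency_matrix) := by unfold Pre_fitness_calculation_1; infer_instance

def pvWitness_fitness_calculation_1 : List Int × List (List Int) :=
  ([0, 1, 0], [[1, 0, 0], [0, 0, 0], [1, 0, 0]])

def Spec_fitness_calculation_1 (individual : List Int) (adjacency_matrix : List (List Int)) (out : Int) : Prop := out = fitness_calculation_1_alt individual adjacency_matrix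
instance (individual : List Int) (adjacency_matrix : List (List Int)) (out : Int) : Decidable (Spec_fitness_calculation_1 individual adjacency_matrix out) := by unfold Spec_fitness_calculation_1; infer_instance

-- ===== CLAIM (what is proved, stated in full; the proofs are below) =====
def Claim_equal_fitness_calculation_1 : Prop := ∀ (individual : List Int) (adjacency_matrix : List (List Int)), Dom_fitness_calculation_1 individual adjacency_matrix → Pre_fitness_calculation_1 individual adjacency_matrix → Spec_fitness_calculation_1 individual adjacency_matrix (fitness_calculation_1 individual adjacency_matrix)

-- ===== LEMMAS AND PROOFS =====

-- a counting loop 'if p x: acc += 1' is the sum of 0/1 indicators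
theorem pvFoldlCount {α : Type} (p : α → Bool) (l : List α) (a : Int) :
    l.foldl (fun acc x => if p x then acc + 1 else acc) a
      = a + (l.map (fun x => if p x then (1 : Int) else 0)).sum := by
  induction l generalizing a with
  | nil => simp
  | cons x t ih => by_cases h : p x <;> simp [h, ih] <;> try ring

-- shared vocabulary: the conflict test, the (color, index) pairs, the index group of a color,
-- the per-source inner count over a group, and the per-source summand
def pvE (adjacency_matrix : List (List Int)) (j i : Int) : Bool :=
  PySem.List.pyGetD (PySem.List.pyGetD adjacency_matrix j []) i 0 == 1

def pvQs (individual : List Int) : List (Int × Int) :=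
  (PySem.List.pyRange 0 (individual.length : Int) 1).map
    (fun j => (PySem.List.pyGetD individual j 0, j))

def pvGrp (individual : List Int) (c : Int) : List Int :=
  ((pvQs individual).filter (fun q => q.1 == c)).map (fun q => q.2)

def pvS (adjacency_matrix : List (List Int)) (g : List Int) (i : Int) : Int :=
  (g.map (fun j => if pvE adjacency_matrix j i then (1 : Int) else 0)).sum

def pvT (individual : List Int) (adjacency_matrix : List (List Int)) (i : Int) : Int :=
  pvS adjacency_matrix (pvGrp individual (PySem.List.pyGetD individual i 0)) i

-- summing over a filtered list is summing an if-guarded term over the whole list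
theorem pvSumFilterMap {α : Type} (p : α → Bool) (h : α → Int) (l : List α) :
    ((l.filter p).map h).sum = (l.map (fun x => if p x then h x else 0)).sum := by
  induction l with
  | nil => simp
  | cons x t ih => by_cases hp : p x <;> simp [hp, ih]

-- A's inner sum over the full range equals the sum over the same-color group of i
theorem pvInner (individual : List Int) (adjacency_matrix : List (List Int)) (i : Int) :
    ((PySem.List.pyRange 0 (individual.length : Int) 1).map
        (fun j => if (PySem.List.pyGetD individual i 0 == PySem.List.pyGetD individual j 0)
            && pvE adjacency_matrix j i then (1 : Int) else 0)).sum
      = pvT individual adjacency_matrix i := by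
  unfold pvT pvS pvGrp
  rw [List.map_map, pvSumFilterMap]
  unfold pvQs
  rw [List.map_map]
  congr 1
  apply List.map_congr_left
  intro j _
  simp only [Function.comp]
  by_cases hc : PySem.List.pyGetD individual j 0 = PySem.List.pyGetD individual i 0
  · simp [hc]
  · have hc' : ¬ PySem.List.pyGetD individual i 0 = PySem.List.pyGetD individual j 0 :=
      fun h => hc h.symm
    simp [hc, hc']

-- A is the sum of pvT over the sources 0 .. n-2
theorem pvStepA (individual : List Int) (adjacency_matrix : List (List Int)) :
    fitness_calculation_1 individual adjacency_matrix
      = ((PySem.List.pyRange 0 ((individual.length : Int) - 1) 1).map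
          (pvT individual adjacency_matrix)).sum := by
  unfold fitness_calculation_1
  have hfun : (fun (acc : Int) i =>
      (PySem.List.pyRange 0 (individual.length : Int) 1).foldl (fun acc j =>
        if (PySem.List.pyGetD individual i 0 == PySem.List.pyGetD individual j 0)
            && (PySem.List.pyGetD (PySem.List.pyGetD adjacency_matrix j []) i 0 == 1)
        then acc + 1 else acc) acc)
      = (fun acc i => acc + pvT individual adjacency_matrix i) := by
    funext acc i
    rw [pvFoldlCount, ← pvInner individual adjacency_matrix i]
    simp [pvE]
  rw [hfun, PySem.List.foldl_add]
  simp

-- the groups dict built by B maps each color to its index group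
theorem pvDictGet (individual : List Int) (c : Int) :
    ((PySem.List.enumerate individual).foldl
        (fun d p => d.modify p.2 [] (fun g => g ++ [p.1])) PySem.Dict.empty).getD c []
      = pvGrp individual c := by
  have henum : PySem.List.enumerate individual
      = (pvQs individual).map (fun q => (q.2, q.1)) := by
    rw [PySem.List.enumerate_eq_map_pyRange individual 0]
    simp [pvQs, List.map_map, Function.comp]
  rw [henum, List.foldl_map]
  have := PySem.Dict.getD_foldl_modify_append (pvQs individual) (PySem.Dict.empty) c
  simpa [pvGrp] using this

-- B is the same sum of pvT over the sources 0 .. n-2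
theorem pvStepB (individual : List Int) (adjacency_matrix : List (List Int)) :
    fitness_calculation_1_alt individual adjacency_matrix
      = ((PySem.List.pyRange 0 ((individual.length : Int) - 1) 1).map
          (pvT individual adjacency_matrix)).sum := by
  unfold fitness_calculation_1_alt
  simp only [PySem.List.slice_to_neg_one]
  have hfun : (fun (acc : Int) (p : Int × Int) =>
      (((PySem.List.enumerate individual).foldl
          (fun d p => d.modify p.2 [] (fun g => g ++ [p.1])) PySem.Dict.empty).getD p.2 []).foldl
        (fun acc j =>
          if PySem.List.pyGetD (PySem.List.pyGetD adjacency_matrix j []) p.1 0 == 1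
          then acc + 1 else acc) acc)
      = (fun acc p => acc + pvS adjacency_matrix (pvGrp individual p.2) p.1) := by
    funext acc p
    rw [pvDictGet, pvFoldlCount]
    simp [pvS, pvE]
  rw [hfun, PySem.List.foldl_add, zero_add]
  rcases individual.eq_nil_or_concat with rfl | ⟨t, x, rfl⟩
  · simp [PySem.List.enumerate_nil, PySem.List.pyRange_one_eq_nil]
  · simp only [List.concat_eq_append]
    have hlen : (PySem.List.len (t ++ [x]).dropLast) = ((t ++ [x]).length : Int) - 1 := by
      simp [PySem.List.len_eq]
    rw [PySem.List.enumerate_eq_map_pyRange (t ++ [x]).dropLast 0, List.map_map, hlen]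
    congr 1
    apply List.map_congr_left
    intro i hi
    obtain ⟨h0, h1⟩ := PySem.List.mem_pyRange_one.mp hi
    obtain ⟨k, rfl⟩ := Int.eq_ofNat_of_zero_le h0
    have hk : k < (t ++ [x]).dropLast.length := by
      have h2 : ((t ++ [x]).dropLast.length : Int) = ((t ++ [x]).length : Int) - 1 := by simp
      omega
    have hget : PySem.List.pyGetD (t ++ [x]).dropLast (k : Int) 0
        = PySem.List.pyGetD (t ++ [x]) (k : Int) 0 := by
      have hk' : k < (t ++ [x]).length :=
        lt_of_lt_of_le hk ((t ++ [x]).length_dropLast ▸ Nat.sub_le _ _)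
      rw [PySem.List.pyGetD_natCast, PySem.List.pyGetD_natCast]
      rw [List.getD_eq_getElem _ _ hk, List.getD_eq_getElem _ _ hk', List.getElem_dropLast]
    simp only [Function.comp, hget, pvT]

-- ===== VERDICT (by name: the statement is the Claim_ definition above) =====
theorem fitness_calculation_1_spec : Claim_equal_fitness_calculation_1 := by
  intro individual adjacency_matrix _ _
  unfold Spec_fitness_calculation_1
  rw [pvStepA, pvStepB]
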